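-- pv_equiv track=rewrite | github.com/guldbach/google-ads-builder | campaigns/geo_utils.py | validate_geo_data
-- ===== SOURCE A (Python) =====
-- from typing import Dict, List, Tuple
--
-- def validate_geo_data(service_name: str, cities: List[str]) -> Tuple[bool, List[str]]:
--     """
--     Validér geo marketing data
--
--     Returns:
--         Tuple af (is_valid, error_messages)
--     """
--     errors = []
--
--     if not service_name or not service_name.strip():
--         errors.append("Service navn er påkrævet")
--
--     if not cities or len(cities) == 0:
--         errors.append("Mindst én by skal vælges")
--
--     # Check for empty city names
--     empty_cities = [city for city in cities if not city or not city.strip()]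
--     if empty_cities:
--         errors.append("Alle byer skal have navne")
--
--     # Check for duplicate cities
--     unique_cities = set(cities)
--     if len(unique_cities) != len(cities):
--         errors.append("Duplikerede byer fundet")
--
--     return len(errors) == 0, errors
-- ===== SOURCE B (Python) =====
-- def validate_geo_data(service_name, cities):
--     """Table-driven validation: the four checks are rows of a (condition, message)
--     table; duplicates are detected by sorting and comparing adjacent elements
--     instead of a set-size comparison."""
--     s = sorted(cities)
--     checks = [
--         (not service_name or not service_name.strip(), "Service navn er påkrævet"),
--         (not cities, "Mindst én by skal vælges"),
--         (any(not c or not c.strip() for c in cities), "Alle byer skal have navne"),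
--         (any(a == b for a, b in zip(s, s[1:])), "Duplikerede byer fundet"),
--     ]
--     errors = [msg for cond, msg in checks if cond]
--     return not errors, errors
-- ===== Notes on version B (the rewrite author's own statement) =====
-- stated objective: alternative
-- what changed: B is table-driven: the four checks become rows of a (condition, message) table filtered into the error list, and duplicates are detected by sorting the cities and comparing adjacent elements instead of comparing len(set(cities)) with len(cities).
import Mathlib
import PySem

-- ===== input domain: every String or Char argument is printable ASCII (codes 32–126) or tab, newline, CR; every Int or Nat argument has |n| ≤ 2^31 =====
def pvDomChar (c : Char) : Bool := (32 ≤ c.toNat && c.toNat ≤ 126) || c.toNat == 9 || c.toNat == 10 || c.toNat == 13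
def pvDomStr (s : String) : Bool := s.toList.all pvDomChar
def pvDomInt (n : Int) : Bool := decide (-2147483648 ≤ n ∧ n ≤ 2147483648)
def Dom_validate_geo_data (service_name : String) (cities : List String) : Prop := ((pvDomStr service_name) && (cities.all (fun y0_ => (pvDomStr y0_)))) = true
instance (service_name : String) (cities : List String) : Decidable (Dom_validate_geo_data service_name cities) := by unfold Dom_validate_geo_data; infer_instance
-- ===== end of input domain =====

-- B is table-driven (a filtered (condition, message) table) and finds duplicates
-- by sorting and comparing adjacent elements instead of a set-size comparison.

-- ===== PORT A =====
def validate_geo_data (service_name : String) (cities : List String) : Bool × List String :=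
  let errors : List String := []
  let errors := if service_name == "" || PySem.Str.strip service_name == "" then
      errors ++ ["Service navn er påkrævet"] else errors
  let errors := if cities == ([] : List String) || cities.length == 0 then
      errors ++ ["Mindst én by skal vælges"] else errors
  let empty_cities := cities.filter (fun city => city == "" || PySem.Str.strip city == "")
  let errors := if empty_cities ≠ [] then errors ++ ["Alle byer skal have navne"] else errors
  let unique_cities : PySem.Set String := PySem.Set.ofList cities
  let errors := if unique_cities.length ≠ cities.length then
      errors ++ ["Duplikerede byer fundet"] else errors
  (errors.length == 0, errors)

-- ===== PORT B =====
def validate_geo_data_alt (service_name : String) (cities : List String) : Bool × List String :=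
  let s := PySem.List.sorted cities (fun x => x) false
  let checks : List (Bool × String) := [
    (service_name == "" || PySem.Str.strip service_name == "", "Service navn er påkrævet"),
    (cities == ([] : List String), "Mindst én by skal vælges"),
    (cities.any (fun c => c == "" || PySem.Str.strip c == ""), "Alle byer skal have navne"),
    ((s.zip (s.drop 1)).any (fun p => p.1 == p.2), "Duplikerede byer fundet")]
  let errors := (checks.filter (fun p => p.1)).map (fun p => p.2)
  (errors == [], errors)

-- ===== PRECONDITION & SPEC =====
def Spec_validate_geo_data (service_name : String) (cities : List String) (out : Bool × List String) : Prop := out = validate_geo_data_alt service_name cities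
instance (service_name : String) (cities : List String) (out : Bool × List String) : Decidable (Spec_validate_geo_data service_name cities out) := by unfold Spec_validate_geo_data; infer_instance

-- ===== CLAIM (what is proved, stated in full; the proofs are below) =====
def Claim_equal_validate_geo_data : Prop := ∀ (service_name : String) (cities : List String), Dom_validate_geo_data service_name cities → Spec_validate_geo_data service_name cities (validate_geo_data service_name cities)

-- ===== LEMMAS AND PROOFS =====

-- in a ≤-sorted list, some adjacent pair is equal iff the list has a duplicate
lemma adj_eq_iff_not_nodup : ∀ (s : List String), s.Pairwise (· ≤ ·) →
    ((s.zip (s.drop 1)).any (fun p => p.1 == p.2)) = !decide s.Nodup := by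
  intro s
  induction s with
  | nil => intro _; simp
  | cons a t ih =>
    intro hp
    cases t with
    | nil => simp
    | cons b t' =>
      have hp' := hp.tail
      have hab : a ≤ b := (List.pairwise_cons.mp hp).1 b List.mem_cons_self
      have hble : ∀ x ∈ t', b ≤ x := fun x hx =>
        (List.pairwise_cons.mp hp').1 x hx
      have hmem : a ∈ b :: t' ↔ a = b := by
        constructor
        · intro h
          rcases List.mem_cons.mp h with h | h
          · exact h
          · exact le_antisymm hab (hble a h)
        · intro h; simp [h]
      have hrest := ih hp'
      simp only [List.drop_one, List.tail_cons, List.zip, List.nodup_cons,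
        decide_not, Bool.not_and] at hrest
      by_cases heq : a = b
      · have hin : a ∈ b :: t' := hmem.mpr heq
        simp [List.zip, heq, List.nodup_cons, hin]
      · have hnm : a ∉ b :: t' := fun h => heq (hmem.mp h)
        simp [List.zip, heq, List.nodup_cons, hnm, hrest]

lemma ofList_length_ne_iff (xs : List String) :
    (PySem.Set.ofList xs).length ≠ xs.length ↔ ¬ xs.Nodup := by
  have hperm : (PySem.Set.ofList xs).Perm xs.dedup := by
    rw [List.perm_ext_iff_of_nodup (PySem.Set.nodup_ofList xs) xs.nodup_dedup]
    intro a; simp [PySem.Set.mem_ofList, List.mem_dedup]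
  rw [hperm.length_eq]
  constructor
  · intro h hnd
    exact h (by rw [List.dedup_eq_self.mpr hnd])
  · intro hnd h
    have : xs.dedup = xs := (List.dedup_sublist xs).eq_of_length h
    exact hnd (List.dedup_eq_self.mp this)

set_option maxHeartbeats 2000000 in
-- ===== VERDICT (by name: the statement is the Claim_ definition above) =====
theorem validate_geo_data_spec : Claim_equal_validate_geo_data := by
  intro service_name cities _
  unfold Spec_validate_geo_data validate_geo_data validate_geo_data_alt
  have hsort := adj_eq_iff_not_nodup (PySem.List.sorted cities (fun x => x) false)
    (PySem.List.sorted_pairwise cities (fun x => x))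
  have hnd : (PySem.List.sorted cities (fun x => x) false).Nodup ↔ cities.Nodup :=
    (PySem.List.sorted_perm cities (fun x => x) false).nodup_iff
  have hfil : (cities.filter (fun city => city == "" || PySem.Str.strip city == "") ≠ []) ↔
      cities.any (fun c => c == "" || PySem.Str.strip c == "") = true := by
    simp only [ne_eq, List.filter_eq_nil_iff, List.any_eq_true]
    push Not
    simp
  by_cases h1 : (service_name == "" || PySem.Str.strip service_name == "") = true <;>
  by_cases h2 : cities = ([] : List String) <;>
  by_cases h3 : cities.any (fun c => c == "" || PySem.Str.strip c == "") = true <;>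
  by_cases h4 : cities.Nodup <;>
    simp_all [hsort, hnd, ofList_length_ne_iff, List.length_eq_zero_iff] <;>
    exact fun x hx => hsort x x hx rfl
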